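-- pv_equiv track=rewrite | github.com/ishita-gupta-2/Music-Composition-using-Genetic-Algorithm | genetic_algo_fitness.py | octave_note_fitness
-- ===== SOURCE A (Python) =====
-- def octave_note_fitness(chromosome):
--     octave_counts = {}
--     for note_tuple in chromosome:
--         octave_index = note_tuple[1]  # Octave index is the second element in the tuple
--         if octave_index in octave_counts:
--             octave_counts[octave_index] += 1
--         else:
--             octave_counts[octave_index] = 1
--     return max(octave_counts.values(), default=1)
-- ===== SOURCE B (Python) =====
-- def octave_note_fitness(chromosome):
--     octaves = sorted(t[1] for t in chromosome)
--     best = 1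
--     run = 0
--     prev = None
--     for o in octaves:
--         run = run + 1 if run and o == prev else 1
--         if run > best:
--             best = run
--         prev = o
--     return best
-- ===== Notes on version B (the rewrite author's own statement) =====
-- stated objective: alternative
-- what changed: Replaces the hash-frequency-map-then-max with sort-then-scan: B sorts the octave indices and finds the longest run of consecutive equal values in one linear scan (equal values are adjacent after sorting, so the longest run length is the max count), keeping the default 1 for the empty chromosome.
import Mathlib
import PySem

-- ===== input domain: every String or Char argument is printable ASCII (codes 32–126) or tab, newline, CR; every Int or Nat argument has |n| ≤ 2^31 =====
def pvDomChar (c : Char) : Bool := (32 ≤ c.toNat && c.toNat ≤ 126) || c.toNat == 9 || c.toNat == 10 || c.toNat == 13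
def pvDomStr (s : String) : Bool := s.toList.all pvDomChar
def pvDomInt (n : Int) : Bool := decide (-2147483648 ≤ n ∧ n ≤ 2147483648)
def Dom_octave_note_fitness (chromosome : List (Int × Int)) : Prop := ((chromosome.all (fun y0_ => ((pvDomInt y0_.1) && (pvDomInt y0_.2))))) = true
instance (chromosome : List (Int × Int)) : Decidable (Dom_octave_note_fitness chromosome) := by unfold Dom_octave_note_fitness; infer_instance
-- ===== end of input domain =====

-- B replaces A's hash-frequency-map-then-max with sort-then-scan of consecutive equal runs
-- (objective: alternative; same return value everywhere).

-- ===== PORT A =====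
-- the dict-building loop: if key present, += 1, else = 1; then max(values, default=1)
def octave_note_fitness (chromosome : List (Int × Int)) : Int :=
  let octave_counts : PySem.Dict Int Int :=
    chromosome.foldl
      (fun d note_tuple =>
        let octave_index := note_tuple.2
        if d.contains octave_index then
          d.insert octave_index (d.getD octave_index 0 + 1)
        else
          d.insert octave_index 1)
      PySem.Dict.empty
  match PySem.List.max? octave_counts.values (fun y => y) with
  | some m => m
  | none => 1

-- ===== PORT B =====
-- the loop body of Source B: state (best, run, prev); 'run = run + 1 if run and o == prev else 1'
def pvStepB (s : Int × Int × Option Int) (o : Int) : Int × Int × Option Int :=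
  let best := s.1
  let run := s.2.1
  let prev := s.2.2
  let run' := if run ≠ 0 ∧ prev = some o then run + 1 else 1
  (if run' > best then run' else best, run', some o)

def octave_note_fitness_alt (chromosome : List (Int × Int)) : Int :=
  let octaves := PySem.List.sorted (chromosome.map (fun t => t.2)) (fun y => y) false
  (octaves.foldl pvStepB (1, 0, none)).1

-- ===== PRECONDITION & SPEC =====
def Spec_octave_note_fitness (chromosome : List (Int × Int)) (out : Int) : Prop := out = octave_note_fitness_alt chromosome
instance (chromosome : List (Int × Int)) (out : Int) : Decidable (Spec_octave_note_fitness chromosome out) := by unfold Spec_octave_note_fitness; infer_instance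

-- ===== CLAIM (what is proved, stated in full; the proofs are below) =====
def Claim_equal_octave_note_fitness : Prop := ∀ (chromosome : List (Int × Int)), Dom_octave_note_fitness chromosome → Spec_octave_note_fitness chromosome (octave_note_fitness chromosome)

-- ===== LEMMAS AND PROOFS =====

-- "max(counts, default=1)" of a list, written with max?: the common normal form of both sides
def pvModeExpr (xs : List Int) : Int :=
  match PySem.List.max? (xs.map (fun o => (xs.count o : Int))) (fun y => y) with
  | some m => m
  | none => 1

-- running max of the count list (0-based); counts are positive, so this is the max count
def pvMC (xs : List Int) : Int :=
  (xs.map (fun o => (xs.count o : Int))).foldl max 0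

-- A's loop body is "insert k (getD k 0 + 1)" in both branches (getD is 0 when the key is absent)
theorem pv_step_eq (d : PySem.Dict Int Int) (k : Int) :
    (if d.contains k then d.insert k (d.getD k 0 + 1) else d.insert k 1)
      = d.insert k (d.getD k 0 + 1) := by
  by_cases h : d.contains k = true
  · simp [h]
  · simp only [Bool.not_eq_true] at h
    have hz : d.getD k 0 = 0 := PySem.Dict.getD_of_not_contains d 0 h
    simp [h, hz]

-- A's dict is Counter(octaves)
theorem pv_fold_eq_counter (c : List (Int × Int)) :
    c.foldl
      (fun d note_tuple =>
        let octave_index := note_tuple.2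
        if d.contains octave_index then
          d.insert octave_index (d.getD octave_index 0 + 1)
        else
          d.insert octave_index 1)
      PySem.Dict.empty
      = PySem.Dict.counter (c.map (fun t => t.2)) := by
  rw [← PySem.Dict.foldl_insert_getD_add_one_eq_counter, List.foldl_map]
  congr 1
  funext d t
  exact pv_step_eq d t.2

-- max over a list under the identity key depends only on membership
theorem pv_max?_congr_mem (l1 l2 : List Int) (h : ∀ x, x ∈ l1 ↔ x ∈ l2) :
    PySem.List.max? l1 (fun y => y) = PySem.List.max? l2 (fun y => y) := by
  rcases h1 : PySem.List.max? l1 (fun y => y) with _ | m1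
  · rw [PySem.List.max?_eq_none_iff] at h1
    rcases h2 : PySem.List.max? l2 (fun y => y) with _ | m2
    · rfl
    · have := PySem.List.max?_mem h2
      rw [← h] at this
      simp [h1] at this
  · rcases h2 : PySem.List.max? l2 (fun y => y) with _ | m2
    · rw [PySem.List.max?_eq_none_iff] at h2
      have := PySem.List.max?_mem h1
      rw [h] at this
      simp [h2] at this
    · have hm1 := PySem.List.max?_mem h1
      have hm2 := PySem.List.max?_mem h2
      have le12 : m1 ≤ m2 := PySem.List.max?_isMax h2 m1 ((h m1).mp hm1)
      have le21 : m2 ≤ m1 := PySem.List.max?_isMax h1 m2 ((h m2).mpr hm2)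
      exact congrArg some (le_antisymm le12 le21)

-- A equals max(counts, default=1) of the octave list
theorem pv_A_eq_mode (c : List (Int × Int)) :
    octave_note_fitness c = pvModeExpr (c.map (fun t => t.2)) := by
  unfold octave_note_fitness pvModeExpr
  simp only [pv_fold_eq_counter]
  set xs := c.map (fun t => t.2) with hxs
  have hvals : (PySem.Dict.counter xs).values
      = (PySem.Set.ofList xs).map (fun k => (xs.count k : Int)) := by
    simp only [PySem.Dict.values, PySem.Dict.items_counter, List.map_map]
    rfl
  rw [hvals, pv_max?_congr_mem _ (xs.map (fun o => (xs.count o : Int)))]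
  intro x
  constructor
  · rintro hx
    rcases List.mem_map.mp hx with ⟨k, hk, rfl⟩
    exact List.mem_map.mpr ⟨k, ((PySem.Set.mem_ofList xs k).mp hk), rfl⟩
  · rintro hx
    rcases List.mem_map.mp hx with ⟨k, hk, rfl⟩
    exact List.mem_map.mpr ⟨k, ((PySem.Set.mem_ofList xs k).mpr hk), rfl⟩

-- pulling a max out of a running max
theorem pv_foldl_max_max (l : List Int) : ∀ (a b : Int),
    List.foldl max (max a b) l = max a (List.foldl max b l) := by
  induction l with
  | nil => intro a b; rfl
  | cons c t ih =>
      intro a b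
      simp only [List.foldl_cons, max_assoc]
      exact ih a (max b c)

theorem pv_foldl_max_le (l : List Int) : ∀ (a m : Int), a ≤ m → (∀ x ∈ l, x ≤ m) →
    List.foldl max a l ≤ m := by
  induction l with
  | nil => intro a m h _; exact h
  | cons c t ih =>
      intro a m ha hl
      exact ih (max a c) m (max_le ha (hl c (List.mem_cons_self))) fun x hx => hl x (List.mem_cons_of_mem _ hx)

theorem pv_foldl_max_replicate (v : Int) : ∀ (k : Nat) (a : Int), 1 ≤ k →
    List.foldl max a (List.replicate k v) = max a v := by
  intro k
  induction k with
  | zero => intro a h; omega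
  | succ n ih =>
      intro a _
      rcases Nat.eq_zero_or_pos n with h0 | h1
      · subst h0; rfl
      · simp only [List.replicate_succ, List.foldl_cons]
        rw [ih (max a v) h1, max_assoc, max_self]

-- run-up over a constant block: run and best both advance by the block length
theorem pv_runup (a : Int) : ∀ (g : List Int), (∀ y ∈ g, y = a) →
    ∀ (best run : Int), 1 ≤ run → run ≤ best →
    List.foldl pvStepB (best, run, some a) g = (max best (run + g.length), run + g.length, some a) := by
  intro g
  induction g with
  | nil =>
      intro _ best run _ hrb
      show (best, run, some a) = _
      rw [List.length_nil, Nat.cast_zero, add_zero, max_eq_left hrb]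
  | cons y t ih =>
      intro hall best run hr hrb
      have hy : y = a := hall y (List.mem_cons_self)
      subst hy
      have hstep : pvStepB (best, run, some y) y = (max best (run + 1), run + 1, some y) := by
        have hne : run ≠ 0 := by omega
        simp only [pvStepB, hne, ne_eq, not_false_eq_true, true_and]
        congr 1
        rw [max_def]
        split_ifs <;> omega
      rw [List.foldl_cons, hstep,
        ih (fun z hz => hall z (List.mem_cons_of_mem _ hz)) (max best (run + 1)) (run + 1)
          (by omega) (le_max_right _ _)]
      have hlen : (((y :: t).length : Nat) : Int) = (t.length : Int) + 1 := by
        rw [List.length_cons]; exact Nat.cast_succ t.length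
      rw [hlen, show run + ((t.length : Int) + 1) = run + 1 + (t.length : Int) from by ring,
        max_assoc, max_eq_right (by omega : (run + 1 : Int) ≤ run + 1 + (t.length : Int))]

-- after a value that never recurs, the scan restarts as from the initial state
theorem pv_reset (l : List Int) (best run prev : Int) (h : ∀ y ∈ l, prev ≠ y) :
    (List.foldl pvStepB (best, run, some prev) l).1
      = (List.foldl pvStepB (best, 0, (none : Option Int)) l).1 := by
  cases l with
  | nil => rfl
  | cons y t =>
      have hne : prev ≠ y := h y (List.mem_cons_self)
      have : pvStepB (best, run, some prev) y = pvStepB (best, 0, (none : Option Int)) y := by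
        simp [pvStepB, hne]
      rw [List.foldl_cons, List.foldl_cons, this]

-- max count of a group-fronted list
theorem pv_mc_group (a : Int) (G dw : List Int) (hG : ∀ y ∈ G, y = a)
    (hdw : ∀ y ∈ dw, y ≠ a) (hne : G ≠ []) :
    pvMC (G ++ dw) = max (G.length : Int) (pvMC dw) := by
  have hcntG : (G ++ dw).count a = G.length := by
    rw [List.count_append, List.count_eq_length.mpr (fun b hb => (hG b hb).symm),
      List.count_eq_zero.mpr (fun hmem => hdw a hmem rfl)]
    omega
  have hmapG : G.map (fun o => ((G ++ dw).count o : Int)) = List.replicate G.length ((G.length : Int)) := by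
    rw [List.map_congr_left (fun o ho => by rw [hG o ho, hcntG]), List.map_const']
  have hmapdw : dw.map (fun o => ((G ++ dw).count o : Int)) = dw.map (fun o => (dw.count o : Int)) := by
    refine List.map_congr_left (fun o ho => ?_)
    have : G.count o = 0 := List.count_eq_zero.mpr (fun hmem => hdw o ho (hG o hmem))
    rw [List.count_append, this]
    simp
  unfold pvMC
  rw [List.map_append, hmapG, hmapdw, List.foldl_append]
  have hlen : 1 ≤ G.length := by
    cases G with
    | nil => exact absurd rfl hne
    | cons _ _ => simp
  rw [pv_foldl_max_replicate _ _ _ hlen]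
  have : max (0 : Int) (G.length : Int) = max (G.length : Int) 0 := max_comm _ _
  rw [this, pv_foldl_max_max]

-- the scan over a sorted list computes max best (max count)
theorem pv_scan_sorted : ∀ (n : Nat) (ys : List Int), ys.length ≤ n →
    List.Pairwise (· ≤ ·) ys → ∀ best : Int, 1 ≤ best →
    (List.foldl pvStepB (best, 0, (none : Option Int)) ys).1 = max best (pvMC ys) := by
  intro n
  induction n with
  | zero =>
      intro ys hlen _ best hb
      have : ys = [] := List.eq_nil_of_length_eq_zero (Nat.le_zero.mp hlen)
      subst this
      simp only [List.foldl_nil, pvMC, List.map_nil]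
      exact (max_eq_left (by omega : (0:Int) ≤ best)).symm
  | succ n ih =>
      intro ys hlen hsort best hb
      cases ys with
      | nil =>
          simp only [List.foldl_nil, pvMC, List.map_nil]
          exact (max_eq_left (by omega : (0:Int) ≤ best)).symm
      | cons a t =>
          have ht : t = t.takeWhile (· == a) ++ t.dropWhile (· == a) := (List.takeWhile_append_dropWhile).symm
          set tw := t.takeWhile (· == a) with htw
          set dw := t.dropWhile (· == a) with hdw
          have hsortt : List.Pairwise (· ≤ ·) t := (List.pairwise_cons.mp hsort).2
          have halet : ∀ y ∈ t, a ≤ y := (List.pairwise_cons.mp hsort).1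
          have htwa : ∀ y ∈ tw, y = a := fun y hy => by
            have := List.mem_takeWhile_imp hy
            exact eq_of_beq this
          have hsortdw : List.Pairwise (· ≤ ·) dw := hsortt.sublist (List.dropWhile_sublist _)
          have hdwgt : ∀ y ∈ dw, a < y := by
            intro y hy
            cases hcase : dw with
            | nil => rw [hcase] at hy; exact absurd hy (List.not_mem_nil)
            | cons b r =>
                have hbne : ¬ (b == a) = true := by
                  have := List.head?_dropWhile_not (· == a) t
                  rw [← hdw, hcase] at this
                  simpa using this
                have hba : b ≠ a := fun h => hbne (by simp [h])
                have hab : a < b := lt_of_le_of_ne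
                  (halet b (by rw [ht, hcase]; exact List.mem_append_right _ (List.mem_cons_self)))
                  (Ne.symm hba)
                rw [hcase] at hy
                rcases List.mem_cons.mp hy with rfl | hyr
                · exact hab
                · exact lt_of_lt_of_le hab ((List.pairwise_cons.mp (hcase ▸ hsortdw)).1 y hyr)
          -- first step
          have hstep1 : pvStepB (best, 0, (none : Option Int)) a = (best, 1, some a) := by
            simp only [pvStepB]
            simp only [ne_eq, not_true_eq_false, false_and, if_false]
            have : ¬ ((1:Int) > best) := by omega
            simp [this]
          rw [List.foldl_cons, hstep1, ht, List.foldl_append,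
            pv_runup a tw htwa best 1 le_rfl hb,
            pv_reset dw _ _ a (fun y hy => ne_of_lt (hdwgt y hy))]
          have hdwlen : dw.length ≤ n := by
            have h1 : dw.length ≤ t.length := List.Sublist.length_le (List.dropWhile_sublist _)
            have h2 : t.length + 1 ≤ n + 1 := by simpa using hlen
            omega
          rw [ih dw hdwlen hsortdw (max best (1 + tw.length)) (le_trans hb (le_max_left _ _))]
          have hgrp : pvMC (a :: tw ++ dw) = max (((a :: tw).length : Int)) (pvMC dw) := by
            exact pv_mc_group a (a :: tw) dw
              (fun y hy => by rcases List.mem_cons.mp hy with rfl | h; rfl; exact htwa y h)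
              (fun y hy => ne_of_gt (hdwgt y hy)) (by simp)
          have : (a :: (tw ++ dw)) = (a :: tw) ++ dw := by simp
          rw [this, hgrp]
          have hlc : ((a :: tw).length : Int) = 1 + tw.length := by rw [List.length_cons, Nat.cast_succ]; ring
          rw [hlc, max_assoc]

-- every count of a member is positive; pvMC bounds and realises the max? of the count list
theorem pv_mode_eq_max_mc (l : List Int) (hne : l ≠ []) : pvModeExpr l = pvMC l := by
  unfold pvModeExpr
  rcases hm : PySem.List.max? (l.map (fun o => (l.count o : Int))) (fun y => y) with _ | m
  · rw [PySem.List.max?_eq_none_iff, List.map_eq_nil_iff] at hm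
    exact absurd hm hne
  · show m = pvMC l
    have hmem := PySem.List.max?_mem hm
    have hmax := PySem.List.max?_isMax hm
    rcases List.mem_map.mp hmem with ⟨o, ho, hoc⟩
    have hm1 : 1 ≤ m := by
      rw [← hoc]
      exact_mod_cast List.count_pos_iff.mpr ho
    have hle : pvMC l ≤ m :=
      pv_foldl_max_le _ 0 m (by omega) (fun x hx => hmax x hx)
    have hge : m ≤ pvMC l := (PySem.List.le_foldl_max (l.map (fun o => (l.count o : Int))) 0).2 m hmem
    exact le_antisymm hge hle

-- B equals max(counts, default=1) of the octave list
theorem pv_B_eq_mode (c : List (Int × Int)) :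
    octave_note_fitness_alt c = pvModeExpr (c.map (fun t => t.2)) := by
  unfold octave_note_fitness_alt
  set xs := c.map (fun t => t.2) with hxs
  set ys := PySem.List.sorted xs (fun y => y) false with hys
  have hperm : ys.Perm xs := PySem.List.sorted_perm xs (fun y => y) false
  have hsort : List.Pairwise (· ≤ ·) ys := PySem.List.sorted_pairwise xs (fun y => y)
  rw [pv_scan_sorted ys.length ys le_rfl hsort 1 le_rfl]
  -- max 1 (pvMC ys) = pvModeExpr ys = pvModeExpr xs
  have hmode : pvModeExpr ys = pvModeExpr xs := by
    unfold pvModeExpr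
    rw [pv_max?_congr_mem (ys.map (fun o => (ys.count o : Int))) (xs.map (fun o => (xs.count o : Int)))]
    intro x
    have hcnt : ys.map (fun o => (ys.count o : Int)) = ys.map (fun o => (xs.count o : Int)) :=
      List.map_congr_left (fun o _ => by rw [hperm.count_eq])
    rw [hcnt]
    exact (hperm.map _).mem_iff
  cases hcase : ys with
  | nil =>
      have hxe : xs = [] := ((hcase ▸ hperm).symm).eq_nil
      rw [← hmode, hcase]
      decide
  | cons b r =>
      have hyne : ys ≠ [] := by rw [hcase]; exact List.cons_ne_nil _ _
      rw [← hmode, pv_mode_eq_max_mc ys hyne]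
      have hbmem : b ∈ ys := by rw [hcase]; exact List.mem_cons_self
      have hmem : ((ys.count b : Int)) ∈ ys.map (fun o => (ys.count o : Int)) :=
        List.mem_map.mpr ⟨b, hbmem, rfl⟩
      have h1 : (1 : Int) ≤ (ys.count b : Int) := by
        exact_mod_cast List.count_pos_iff.mpr hbmem
      have hmc : 1 ≤ pvMC ys := by
        unfold pvMC
        exact le_trans h1 ((PySem.List.le_foldl_max (ys.map (fun o => (ys.count o : Int))) 0).2 _ hmem)
      rw [← hcase]
      exact max_eq_right hmc

-- ===== VERDICT (by name: the statement is the Claim_ definition above) =====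
theorem octave_note_fitness_spec : Claim_equal_octave_note_fitness := by
  intro c _
  unfold Spec_octave_note_fitness
  rw [pv_A_eq_mode, pv_B_eq_mode]
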